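-- pv_equiv track=rewrite | github.com/pfrap/corso_python | TDE_Sol_Python_Recenti/2021_01_30_dafare/z_sol_flottaAuto.py | trovaAuto
-- ===== SOURCE A (Python) =====
-- def trovaAuto(ds):
--     # Implementa il codice della funzione qua sotto. Questa riga puo' essere cancellata.
--     pass
--     diz={}
--     for tu in ds:
--         targa=tu[1]
--         km=tu[3]
--         if targa in diz:
--             diz[targa]+=km
--         else:
--             diz[targa]=km
--
--     li = list(diz.keys()) # creo una lista di targhe
--
--     # ordino le targhe in ordine decrescente di km
--     # uso il bubble sort
--     ordinato=False
--     while ordinato==False: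
--         ordinato=True
--         ii=0
--         while ii<len(li)-1:
--             if diz[li[ii]] < diz[li[ii+1]]: # se le percorrenze non sono nell'ordine giusto
--                 #scambio le targhe
--                 temp=li[ii]
--                 li[ii]=li[ii+1]
--                 li[ii+1]=temp
--                 ordinato=False
--             ii+=1
--
--     return li[:5] # restituisco solo i primi 5 elementi della lista
-- ===== SOURCE B (Python) =====
-- def trovaAuto(ds):
--     diz = {}
--     for tu in ds:
--         diz[tu[1]] = diz.get(tu[1], 0) + tu[3]
--     return sorted(diz, key=lambda t: -diz[t])[:5]
-- ===== Notes on version B (the rewrite author's own statement) =====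
-- stated objective: faster
-- what changed: The hand-written bubble sort over the plate list (repeated full passes with adjacent swaps) is replaced by one call to Python's built-in stable sort with key -km, and the if/in dict accumulation by dict.get with a default.
import Mathlib
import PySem

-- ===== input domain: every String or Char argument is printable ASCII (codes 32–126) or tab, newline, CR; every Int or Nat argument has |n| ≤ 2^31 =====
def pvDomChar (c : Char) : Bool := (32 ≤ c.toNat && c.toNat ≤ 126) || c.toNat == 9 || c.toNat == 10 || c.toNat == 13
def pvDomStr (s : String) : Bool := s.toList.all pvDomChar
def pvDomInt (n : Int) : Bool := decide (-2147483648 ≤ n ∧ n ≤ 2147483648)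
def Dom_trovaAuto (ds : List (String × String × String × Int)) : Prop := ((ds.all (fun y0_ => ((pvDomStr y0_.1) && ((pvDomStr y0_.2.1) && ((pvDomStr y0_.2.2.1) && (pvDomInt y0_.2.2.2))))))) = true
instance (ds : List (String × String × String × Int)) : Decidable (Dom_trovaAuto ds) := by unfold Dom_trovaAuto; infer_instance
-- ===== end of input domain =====

-- B replaces A's hand-written bubble sort of the plate list by one call to Python's built-in
-- stable sort with key -km (objective: a faster sort of the distinct plates).

-- ===== PORT A =====
-- one pass of A's inner `while ii<len(li)-1` loop: compare/swap adjacent plates, flag any swap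
def bubblePass (val : String → Int) : List String → List String × Bool
  | [] => ([], false)
  | [x] => ([x], false)
  | x :: y :: rest =>
    if val x < val y then
      let r := bubblePass val (x :: rest)
      (y :: r.1, true)
    else
      let r := bubblePass val (y :: rest)
      (x :: r.1, r.2)

-- number of out-of-order pairs; termination measure of A's outer `while ordinato==False` loop
def bubbleInv (val : String → Int) : List String → Nat
  | [] => 0
  | x :: xs => xs.countP (fun y => val x < val y) + bubbleInv val xs

theorem bubblePass_perm (val : String → Int) (l : List String) : (bubblePass val l).1.Perm l := by
  fun_induction bubblePass val l with
  | case1 => simp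
  | case2 x => simp
  | case3 x y rest h r ih => exact (ih.cons y).trans (List.Perm.swap x y rest)
  | case4 x y rest h r ih => exact ih.cons x

theorem bubblePass_inv_le (val : String → Int) (l : List String) :
    bubbleInv val (bubblePass val l).1 ≤ bubbleInv val l := by
  fun_induction bubblePass val l with
  | case1 => simp
  | case2 x => simp
  | case3 x y rest h r ih =>
    simp only [r] at *
    have hc : (bubblePass val (x :: rest)).1.countP (fun z => val y < val z)
        = (x :: rest).countP (fun z => val y < val z) :=
      (bubblePass_perm val (x :: rest)).countP_eq _
    have hyx : decide (val y < val x) = false := by simp; omega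
    simp [bubbleInv, hc, List.countP_cons, hyx] at *
    omega
  | case4 x y rest h r ih =>
    simp only [r] at *
    have hc : (bubblePass val (y :: rest)).1.countP (fun z => val x < val z)
        = (y :: rest).countP (fun z => val x < val z) :=
      (bubblePass_perm val (y :: rest)).countP_eq _
    simp only [bubbleInv, hc, List.countP_cons] at *
    omega

-- a pass that swapped something strictly decreases the inversion count (A's loop terminates)
theorem bubblePass_inv_lt (val : String → Int) (l : List String) (h : (bubblePass val l).2 = true) :
    bubbleInv val (bubblePass val l).1 < bubbleInv val l := by
  fun_induction bubblePass val l with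
  | case1 => simp at h
  | case2 x => simp at h
  | case3 x y rest hlt r ih =>
    clear ih h
    simp only [r] at *
    have hc : (bubblePass val (x :: rest)).1.countP (fun z => val y < val z)
        = (x :: rest).countP (fun z => val y < val z) :=
      (bubblePass_perm val (x :: rest)).countP_eq _
    have hle := bubblePass_inv_le val (x :: rest)
    have hyx : decide (val y < val x) = false := by simp; omega
    have hxy : decide (val x < val y) = true := by simpa using hlt
    simp [bubbleInv, hc, hyx, hxy] at *
    omega
  | case4 x y rest hge r ih =>
    simp only [r] at *
    have := ih h
    have hc : (bubblePass val (y :: rest)).1.countP (fun z => val x < val z)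
        = (y :: rest).countP (fun z => val x < val z) :=
      (bubblePass_perm val (y :: rest)).countP_eq _
    simp only [bubbleInv, hc, List.countP_cons] at *
    omega

-- A's outer `while ordinato==False` loop: repeat passes until no swap happened
def bubbleLoop (val : String → Int) (l : List String) : List String :=
  let p := bubblePass val l
  if h : p.2 = true then bubbleLoop val p.1 else p.1
termination_by bubbleInv val l
decreasing_by exact bubblePass_inv_lt val l h

def trovaAuto (ds : List (String × String × String × Int)) : List String :=
  let diz := ds.foldl (fun diz tu =>
    let targa := tu.2.1
    let km := tu.2.2.2
    if diz.contains targa then diz.modify targa 0 (· + km)   -- diz[targa] += km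
    else diz.insert targa km) PySem.Dict.empty
  let li := diz.keys
  let li := bubbleLoop (fun t => diz.getD t 0) li
  PySem.List.slice li none (some 5)                          -- li[:5]

-- ===== PORT B =====
def trovaAuto_alt (ds : List (String × String × String × Int)) : List String :=
  let diz := ds.foldl (fun diz tu =>
    diz.insert tu.2.1 (diz.getD tu.2.1 0 + tu.2.2.2)) PySem.Dict.empty
  PySem.List.slice (PySem.List.sorted diz.keys (fun t => -(diz.getD t 0)) false) none (some 5)

-- ===== PRECONDITION & SPEC =====
def Spec_trovaAuto (ds : List (String × String × String × Int)) (out : List String) : Prop := out = trovaAuto_alt ds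
instance (ds : List (String × String × String × Int)) (out : List String) : Decidable (Spec_trovaAuto ds out) := by unfold Spec_trovaAuto; infer_instance

-- ===== CLAIM (what is proved, stated in full; the proofs are below) =====
def Claim_equal_trovaAuto : Prop := ∀ (ds : List (String × String × String × Int)), Dom_trovaAuto ds → Spec_trovaAuto ds (trovaAuto ds)

-- ===== LEMMAS AND PROOFS =====

theorem bubblePass_mem (val : String → Int) (l : List String) (z : String) :
    z ∈ (bubblePass val l).1 ↔ z ∈ l :=
  (bubblePass_perm val l).mem_iff

-- a pass preserves any pairwise relation that holds vacuously on strictly val-increasing pairs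
theorem bubblePass_pairwise (val : String → Int) (Q : String → String → Prop)
    (hswap : ∀ a b, val a < val b → Q b a)
    (l : List String) (h : l.Pairwise Q) : (bubblePass val l).1.Pairwise Q := by
  fun_induction bubblePass val l with
  | case1 => simp
  | case2 x => simp
  | case3 x y rest hlt r ih =>
    simp only [r] at *
    rcases List.pairwise_cons.1 h with ⟨hxall, h2⟩
    rcases List.pairwise_cons.1 h2 with ⟨hyall, h3⟩
    refine List.pairwise_cons.2 ⟨?_, ih ?_⟩
    · intro z hz
      rcases (bubblePass_mem val (x :: rest) z).1 hz with hz'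
      rcases List.mem_cons.1 hz' with rfl | hz''
      · exact hswap _ _ hlt
      · exact hyall _ hz''
    · exact List.pairwise_cons.2 ⟨fun z hz => hxall _ (List.mem_cons_of_mem _ hz), h3⟩
  | case4 x y rest hge r ih =>
    simp only [r] at *
    rcases List.pairwise_cons.1 h with ⟨hxall, h2⟩
    refine List.pairwise_cons.2 ⟨?_, ih h2⟩
    intro z hz
    exact hxall _ ((bubblePass_mem val (y :: rest) z).1 hz)

-- if a pass made no swap, the list is unchanged and adjacent-ordered
theorem bubblePass_false (val : String → Int) (l : List String) (h : (bubblePass val l).2 = false) :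
    (bubblePass val l).1 = l ∧ l.IsChain (fun a b => ¬ val a < val b) := by
  fun_induction bubblePass val l with
  | case1 => simp
  | case2 x => simp
  | case3 x y rest hlt r ih => simp [r] at h
  | case4 x y rest hge r ih =>
    simp only [r] at *
    rcases ih h with ⟨heq, hch⟩
    refine ⟨by rw [heq], ?_⟩
    exact List.IsChain.cons_cons hge hch

theorem bubbleLoop_perm (val : String → Int) (l : List String) : (bubbleLoop val l).Perm l := by
  induction l using bubbleLoop.induct (val := val) with
  | case1 x p h ih =>
    rw [bubbleLoop]; rw [dif_pos (show (bubblePass val x).2 = true from h)]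
    exact ih.trans (bubblePass_perm val x)
  | case2 x p h =>
    rw [bubbleLoop]; rw [dif_neg (show ¬ (bubblePass val x).2 = true from h)]
    exact bubblePass_perm val x

theorem bubbleLoop_pairwise (val : String → Int) (Q : String → String → Prop)
    (hswap : ∀ a b, val a < val b → Q b a) :
    ∀ (l : List String), l.Pairwise Q → (bubbleLoop val l).Pairwise Q := by
  intro l
  induction l using bubbleLoop.induct (val := val) with
  | case1 x p h ih =>
    intro hx
    rw [bubbleLoop]; rw [dif_pos (show (bubblePass val x).2 = true from h)]
    exact ih (bubblePass_pairwise val Q hswap x hx)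
  | case2 x p h =>
    intro hx
    rw [bubbleLoop]; rw [dif_neg (show ¬ (bubblePass val x).2 = true from h)]
    exact bubblePass_pairwise val Q hswap x hx

theorem bubbleLoop_chain (val : String → Int) (l : List String) :
    (bubbleLoop val l).IsChain (fun a b => ¬ val a < val b) := by
  induction l using bubbleLoop.induct (val := val) with
  | case1 x p h ih =>
    rw [bubbleLoop]; rw [dif_pos (show (bubblePass val x).2 = true from h)]
    exact ih
  | case2 x p h =>
    rw [bubbleLoop]; rw [dif_neg (show ¬ (bubblePass val x).2 = true from h)]
    rcases bubblePass_false val x (by simpa using h) with ⟨heq, hch⟩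
    rw [heq]; exact hch

-- stability of PySem's insertion sort, via its foldl/insertBy characterisation
theorem insertBy_pairwise_le {key : String → Int} (x : String) (acc : List String)
    (h : acc.Pairwise (fun a b => key a ≤ key b)) :
    (PySem.List.insertBy (fun a b => decide (key a < key b)) x acc).Pairwise (fun a b => key a ≤ key b) := by
  induction acc with
  | nil => simp [PySem.List.insertBy]
  | cons y ys ih =>
    rcases List.pairwise_cons.1 h with ⟨hyall, hys⟩
    by_cases hxy : key x < key y
    · simp only [PySem.List.insertBy, hxy, decide_true, if_true]
      refine List.pairwise_cons.2 ⟨?_, h⟩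
      intro z hz
      rcases List.mem_cons.1 hz with rfl | hz'
      · exact le_of_lt hxy
      · exact le_of_lt (lt_of_lt_of_le hxy (hyall _ hz'))
    · simp only [PySem.List.insertBy, hxy, decide_false, if_false]
      refine List.pairwise_cons.2 ⟨?_, ih hys⟩
      intro z hz
      rcases (PySem.List.mem_insertBy _ _ _ _).1 hz with rfl | hz'
      · omega
      · exact hyall _ hz'

theorem insertBy_pairwise_stable {key : String → Int} (Q : String → String → Prop)
    (hvac : ∀ a b, key a < key b → Q a b)
    (x : String) (acc : List String)
    (hle : acc.Pairwise (fun a b => key a ≤ key b))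
    (hQ : acc.Pairwise Q)
    (hx : ∀ y ∈ acc, Q y x) :
    (PySem.List.insertBy (fun a b => decide (key a < key b)) x acc).Pairwise Q := by
  induction acc with
  | nil => simp [PySem.List.insertBy]
  | cons y ys ih =>
    rcases List.pairwise_cons.1 hle with ⟨hyall, hys⟩
    rcases List.pairwise_cons.1 hQ with ⟨hyQ, hysQ⟩
    by_cases hxy : key x < key y
    · simp only [PySem.List.insertBy, hxy, decide_true, if_true]
      refine List.pairwise_cons.2 ⟨?_, hQ⟩
      intro z hz
      rcases List.mem_cons.1 hz with rfl | hz'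
      · exact hvac _ _ hxy
      · exact hvac _ _ (lt_of_lt_of_le hxy (hyall _ hz'))
    · simp only [PySem.List.insertBy, hxy, decide_false, if_false]
      refine List.pairwise_cons.2 ⟨?_, ih hys hysQ (fun z hz => hx z (List.mem_cons_of_mem _ hz))⟩
      intro z hz
      rcases (PySem.List.mem_insertBy _ _ _ _).1 hz with rfl | hz'
      · exact hx y (List.mem_cons_self)
      · exact hyQ _ hz'

theorem foldl_insertBy_stable {key : String → Int} (Q : String → String → Prop)
    (hvac : ∀ a b, key a < key b → Q a b) :
    ∀ (l acc : List String), l.Pairwise Q →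
      acc.Pairwise (fun a b => key a ≤ key b) → acc.Pairwise Q →
      (∀ y ∈ acc, ∀ z ∈ l, Q y z) →
      (l.foldl (fun acc x => PySem.List.insertBy (fun a b => decide (key a < key b)) x acc) acc).Pairwise Q := by
  intro l
  induction l with
  | nil => intro acc _ _ hQ _; simpa using hQ
  | cons x l' ih =>
    intro acc hl hle hQ hcross
    rcases List.pairwise_cons.1 hl with ⟨hxall, hl'⟩
    simp only [List.foldl_cons]
    refine ih _ hl' (insertBy_pairwise_le x acc hle)
      (insertBy_pairwise_stable Q hvac x acc hle hQ (fun y hy => hcross y hy x List.mem_cons_self))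
      ?_
    intro y hy z hz
    rcases (PySem.List.mem_insertBy _ _ _ _).1 hy with rfl | hy'
    · exact hxall _ hz
    · exact hcross y hy' z (List.mem_cons_of_mem _ hz)

theorem nodup_pairwise_idxOf (ks : List String) (hnd : ks.Nodup) :
    ks.Pairwise (fun a b => List.idxOf a ks < List.idxOf b ks) := by
  rw [List.pairwise_iff_getElem]
  intro i j hi hj hij
  rw [List.Nodup.idxOf_getElem hnd i hi, List.Nodup.idxOf_getElem hnd j hj]
  exact hij

theorem sorted_stable (ks : List String) (key : String → Int) (hnd : ks.Nodup) :
    (PySem.List.sorted ks key false).Pairwise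
      (fun a b => key a = key b → List.idxOf a ks < List.idxOf b ks) := by
  rw [PySem.List.sorted_eq_foldl_insertBy]
  refine foldl_insertBy_stable _ (fun a b hab heq => absurd heq (by omega)) ks [] ?_ (by simp) (by simp) (by simp)
  exact (nodup_pairwise_idxOf ks hnd).imp (fun h => fun _ => h)

theorem isChain_and {R S : String → String → Prop} :
    ∀ {l : List String}, l.IsChain R → l.IsChain S → l.IsChain (fun a b => R a b ∧ S a b) := by
  intro l
  induction l with
  | nil => intro _ _; exact List.IsChain.nil
  | cons a l ih =>
    cases l with
    | nil => intro _ _; exact List.isChain_singleton a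
    | cons b l =>
      intro hR hS
      rcases List.isChain_cons_cons.1 hR with ⟨hRab, hR'⟩
      rcases List.isChain_cons_cons.1 hS with ⟨hSab, hS'⟩
      exact List.isChain_cons_cons.2 ⟨⟨hRab, hSab⟩, ih hR' hS'⟩

-- the central fact: A's bubble sort of a duplicate-free list is Python's stable sort by -km
-- (both are permutations of ks that are strictly ordered by (km descending, first-seen order))
theorem bubble_eq_sorted (val : String → Int) (ks : List String) (hnd : ks.Nodup) :
    bubbleLoop val ks = PySem.List.sorted ks (fun t => -(val t)) false := by
  set key : String → Int := fun t => -(val t) with hkey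
  set r : String → String → Prop :=
    fun a b => key a < key b ∨ (key a = key b ∧ List.idxOf a ks < List.idxOf b ks) with hr
  have hS_le : (PySem.List.sorted ks key false).Pairwise (fun a b => key a ≤ key b) :=
    PySem.List.sorted_pairwise ks key
  have hS_st := sorted_stable ks key hnd
  have hS_r : (PySem.List.sorted ks key false).Pairwise r := by
    refine (hS_le.and hS_st).imp ?_
    rintro a b ⟨hle, hst⟩
    rcases lt_or_eq_of_le hle with hlt | heq
    · exact Or.inl hlt
    · exact Or.inr ⟨heq, hst heq⟩
  have hQ : (bubbleLoop val ks).Pairwise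
      (fun a b => val a = val b → List.idxOf a ks < List.idxOf b ks) := by
    refine bubbleLoop_pairwise val _ ?_ ks ?_
    · intro a b hab heq; omega
    · exact (nodup_pairwise_idxOf ks hnd).imp (fun h => fun _ => h)
  have hch := bubbleLoop_chain val ks
  have hB_r : (bubbleLoop val ks).Pairwise r := by
    haveI : Trans r r r := by
      refine ⟨?_⟩
      rintro a b c (hab | ⟨hab, iab⟩) (hbc | ⟨hbc, ibc⟩)
      · exact Or.inl (hab.trans hbc)
      · exact Or.inl (by omega)
      · exact Or.inl (by omega)
      · exact Or.inr ⟨by omega, by omega⟩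
    refine List.IsChain.pairwise ?_
    refine (isChain_and hch hQ.isChain).imp ?_
    rintro a b ⟨hnlt, hq⟩
    rcases lt_trichotomy (val a) (val b) with h | h | h
    · exact absurd h hnlt
    · exact Or.inr ⟨by simp [hkey, h], hq h⟩
    · exact Or.inl (by simp only [hkey]; omega)
  have hperm : (bubbleLoop val ks).Perm (PySem.List.sorted ks key false) :=
    (bubbleLoop_perm val ks).trans (PySem.List.sorted_perm ks key false).symm
  refine List.eq_of_perm_of_sorted ?_ hB_r hS_r hperm
  intro a b _ _ hab hba
  rcases hab with h1 | ⟨h1, h2⟩ <;> rcases hba with h3 | ⟨h3, h4⟩ <;> omega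

-- A's if/in accumulation and B's get-with-default accumulation build the same dict
theorem dict_fold_eq (ds : List (String × String × String × Int)) :
    ds.foldl (fun diz (tu : String × String × String × Int) =>
      let targa := tu.2.1
      let km := tu.2.2.2
      if diz.contains targa then diz.modify targa 0 (· + km)
      else diz.insert targa km) PySem.Dict.empty
    = ds.foldl (fun diz tu => diz.insert tu.2.1 (diz.getD tu.2.1 0 + tu.2.2.2)) PySem.Dict.empty := by
  refine PySem.List.foldl_congr_mem ds _ _ _ ?_
  intro acc tu _
  by_cases hc : acc.contains tu.2.1
  · simp only [hc, if_true]
    rfl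
  · have hc' : acc.contains tu.2.1 = false := by simpa using hc
    simp [hc', PySem.Dict.getD_of_not_contains (d := acc) (k := tu.2.1) (d0 := 0) hc']

-- ===== VERDICT (by name: the statement is the Claim_ definition above) =====
theorem trovaAuto_spec : Claim_equal_trovaAuto := by
  intro ds _
  unfold Spec_trovaAuto trovaAuto trovaAuto_alt
  rw [dict_fold_eq]
  have hnd : (ds.foldl (fun diz tu => diz.insert tu.2.1 (diz.getD tu.2.1 0 + tu.2.2.2)) PySem.Dict.empty).keys.Nodup :=
    PySem.Dict.nodup_keys_foldl_insert_key ds (fun tu => tu.2.1) _ _ PySem.Dict.nodup_keys_empty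
  simp only [bubble_eq_sorted _ _ hnd]
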